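-- pv_equiv track=rewrite | github.com/esampson/codes | codes/scroll.py | scroll
-- ===== SOURCE A (Python) =====
-- import textwrap
--
-- def scroll(original, width=80, margins=5,top=1, bottom=1, padding=0, replacements=[]):
--     temp = []
--     for x in range(top):
--         temp.append(' ')
--     for line in original.split('\\n'):
--         if line == '':
--             temp.append(' ')
--         else:
--             temp.append(line)
--     for x in range(bottom):
--         temp.append(' ')
--     message = []
--     for line in temp:
--         if line != ' ':
--             for item in textwrap.wrap(line,(width - (margins * 2))):
--                 message.append(item)
--         else:
--             message.append(' ')
--     reps = int(.9 + ((len(message)-4)/8))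
--     new_length = 5 + reps * 8
--     border_top = int((new_length - len(message))/2)
--     border_bottom = new_length - len(message) - border_top
--     reassemble = []
--     for x in range(border_top):
--         reassemble.append(' ')
--     for line in message:
--         reassemble.append(line)
--     for x in range(border_bottom):
--         reassemble.append(' ')
--     shape = []
--     iwidth = width - (margins * 2)
--     m = ' ' * margins
--     shape.append('  ' + '_' * width + '__')
--     shape.append(' /' + m + reassemble[0].ljust(iwidth) + m + '/ \\ ')
--     shape.append('|' + m + reassemble[1].ljust(iwidth) + m + '| \\/ ')
--     shape.append('|' + m + reassemble[2].ljust(iwidth) + m + '| ')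
--     shape.append(' \\' + m + reassemble[3].ljust(iwidth) + m + '\\ ')
--     count = 0
--     for loop in range(reps):
--         shape.append('  \\' + m + reassemble[4 + count * 8].ljust(iwidth) + m + '\\ ')
--         shape.append('   |' + m + reassemble[5 + count * 8].ljust(iwidth) + m + '| ')
--         shape.append('   |' + m + reassemble[6 + count * 8].ljust(iwidth) + m + '| ')
--         shape.append('  /' + m + reassemble[7 + count * 8].ljust(iwidth) + m + '/ ')
--         shape.append(' /' + m + reassemble[8 + count * 8].ljust(iwidth) + m + '/ ')
--         shape.append('|' + m + reassemble[9 + count * 8].ljust(iwidth) + m + '| ')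
--         shape.append('|' + m + reassemble[10 + count * 8].ljust(iwidth) + m + '| ')
--         shape.append(' \\' + m + reassemble[11 + count * 8].ljust(iwidth) + m + '\\ ')
--         count = count + 1
--     shape.append(' _\\' + '_' * (margins + iwidth + margins) + ' \\ ')
--     shape.append('/ ' + ' ' * (margins + iwidth + margins) + '/\\ | ')
--     shape.append('\\' + '_' * (margins + iwidth + margins + 1) + '\\_/ ')
--     final = ''
--     for line in shape:
--         data = line
--         for item in replacements:
--             data = data.replace(item[0],item[1])
--         final = final + ' ' * padding + data + '|/'
--     return final
-- ===== SOURCE B (Python) =====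
-- import textwrap
--
--
-- def scroll(original, width=80, margins=5, top=1, bottom=1, padding=0, replacements=[]):
--     iwidth = width - 2 * margins
--     m = ' ' * margins
--
--     def finish(line):
--         for item in replacements:
--             line = line.replace(item[0], item[1])
--         return ' ' * padding + line + '|/'
--
--     def row(pre, body, suf):
--         return finish(pre + m + body.ljust(iwidth) + m + suf)
--
--     message = []
--     for line in [' '] * top + original.split('\\n') + [' '] * bottom:
--         if line in ('', ' '):
--             message.append(' ')
--         else:
--             message.extend(textwrap.wrap(line, iwidth))
--
--     n = len(message)
--     reps = (n + 3) // 8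
--     gap = 5 + reps * 8 - n
--     content = [' '] * (gap // 2) + message + [' '] * (gap - gap // 2)
--
--     def blocks(rest):
--         if len(rest) <= 1:
--             return []
--         a, b, c, d, e, f, g, h = rest[:8]
--         return [row('  \\', a, '\\ '), row('   |', b, '| '), row('   |', c, '| '),
--                 row('  /', d, '/ '), row(' /', e, '/ '), row('|', f, '| '),
--                 row('|', g, '| '), row(' \\', h, '\\ ')] + blocks(rest[8:])
--
--     inner = 2 * margins + iwidth
--     parts = [finish('  ' + '_' * width + '__'),
--              row(' /', content[0], '/ \\ '), row('|', content[1], '| \\/ '),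
--              row('|', content[2], '| '), row(' \\', content[3], '\\ ')] \
--         + blocks(content[4:]) \
--         + [finish(' _\\' + '_' * inner + ' \\ '), finish('/ ' + ' ' * inner + '/\\ | '),
--            finish('\\' + '_' * (inner + 1) + '\\_/ ')]
--     return ''.join(parts)
-- ===== Notes on version B (the rewrite author's own statement) =====
-- stated objective: alternative
-- what changed: B never materialises A's shape list or the counter-indexed reassemble lookups: it wraps in one fused loop, then a recursive function destructures the padded content list eight lines at a time (structural recursion on the list instead of range(reps) with reassemble[k+count*8] indexing), and each output row is finalised (replacements, padding, '|/') at the moment it is emitted, so A's separate final pass over shape disappears.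
import Mathlib
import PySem

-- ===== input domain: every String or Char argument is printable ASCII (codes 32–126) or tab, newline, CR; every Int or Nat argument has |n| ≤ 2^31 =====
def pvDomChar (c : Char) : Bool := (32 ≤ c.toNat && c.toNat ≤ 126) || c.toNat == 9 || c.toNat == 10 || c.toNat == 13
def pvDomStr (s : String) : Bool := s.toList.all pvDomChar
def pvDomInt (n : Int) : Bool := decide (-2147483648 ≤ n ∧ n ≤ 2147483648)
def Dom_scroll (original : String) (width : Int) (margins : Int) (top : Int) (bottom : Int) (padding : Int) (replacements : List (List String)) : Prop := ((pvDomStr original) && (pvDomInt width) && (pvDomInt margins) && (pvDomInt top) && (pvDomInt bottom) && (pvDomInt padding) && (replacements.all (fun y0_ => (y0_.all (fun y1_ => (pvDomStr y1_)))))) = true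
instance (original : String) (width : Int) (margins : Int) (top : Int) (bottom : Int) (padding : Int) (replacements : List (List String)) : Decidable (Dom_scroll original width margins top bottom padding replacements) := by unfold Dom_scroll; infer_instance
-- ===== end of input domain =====

-- B builds the same scroll by recursively consuming the content list eight lines at a time and
-- finalising every row (replacements, padding, '|/') as it is emitted, instead of A's indexed
-- shape list plus a second finishing pass; same return value, no argument is mutated.

-- ===== PORT A =====
-- Shared helper: an exact model of CPython 3.11 textwrap.wrap(text, width) with default options,
-- on the ASCII domain (printable + tab/newline/CR).  Both Pythons call textwrap.wrap identically.

-- character classes of textwrap's wordsep regex, ASCII (exact on the stated domain)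
def twWordChar (c : Char) : Bool :=
  ('a' ≤ c && c ≤ 'z') || ('A' ≤ c && c ≤ 'Z') || ('0' ≤ c && c ≤ '9') || c == '_'
def twLetter (c : Char) : Bool :=
  ('a' ≤ c && c ≤ 'z') || ('A' ≤ c && c ≤ 'Z') || c == '_'
def twWordPunct (c : Char) : Bool :=
  twWordChar c || c == '!' || c == '"' || c == '\'' || c == '&' || c == '.' || c == ',' || c == '?'
def twWS (c : Char) : Bool :=
  c == '\t' || c == '\n' || c == '\x0b' || c == '\x0c' || c == '\r' || c == ' '

-- str.expandtabs(8): column resets on '\n' and '\r' (exact)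
def twExpandTabs : List Char → Nat → List Char
  | [], _ => []
  | c :: rest, col =>
    if c = '\t' then
      let n := 8 - col % 8
      List.replicate n ' ' ++ twExpandTabs rest (col + n)
    else if c = '\n' ∨ c = '\r' then c :: twExpandTabs rest 0
    else c :: twExpandTabs rest (col + 1)

-- TextWrapper._munge_whitespace (expand_tabs=True, replace_whitespace=True)
def twMunge (s : List Char) : List Char :=
  (twExpandTabs s 0).map (fun c => if twWS c then ' ' else c)

-- character of t at j, NUL when out of range (regex lookarounds fail off either end)
def twGet (t : List Char) (j : Nat) : Char := t.getD j '\x00'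

-- end of the maximal run of characters satisfying p starting at j (fuel ≥ t.length + 1 - j never
-- runs out: j grows by 1 per step and the run stops at t.length)
def twRunEnd (t : List Char) (p : Char → Bool) : Nat → Nat → Nat
  | 0, j => j
  | fuel + 1, j => if decide (j < t.length) && p (twGet t j) then twRunEnd t p fuel (j + 1) else j

-- lookahead (?=-{2,}\w) at position j: a maximal hyphen run of length ≥ 2 followed by a word char
def twEmDashAhead (t : List Char) (j : Nat) : Bool :=
  let r := twRunEnd t (· == '-') (t.length + 1) j
  decide (j + 2 ≤ r) && twWordChar (twGet t r)

-- the lazy tail of the word alternative: smallest end ≥ j closing the chunk that started at i = j - k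
def twAlt3 (t : List Char) : Nat → Nat → Nat
  | 0, j => j
  | fuel + 1, j =>
    if decide (j < t.length) then
      if twGet t j == '-'
          && ((decide (2 ≤ j) && twLetter (twGet t (j-2)) && twLetter (twGet t (j-1)))
              || (decide (3 ≤ j) && twLetter (twGet t (j-3)) && (twGet t (j-2) == '-') && twLetter (twGet t (j-1))))
          && twLetter (twGet t (j+1))
          && (twLetter (twGet t (j+2)) || ((twGet t (j+2) == '-') && twLetter (twGet t (j+3)))) then
        j + 1                                     -- hyphenated-word break: the '-' is consumed
      else if twGet t j == ' ' then j             -- end of word before whitespace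
      else if twWordPunct (twGet t (j-1)) && twEmDashAhead t j then j   -- break before an em-dash
      else twAlt3 t fuel (j + 1)
    else j                                        -- end of word at end of text

-- TextWrapper._split on munged text (wordsep_re with break_on_hyphens=True), as a left-to-right
-- scan; every step advances the position, so fuel = t.length + 1 never runs out
def twSplitGo (t : List Char) : Nat → Nat → List (List Char)
  | 0, _ => []
  | fuel + 1, i =>
    if decide (i < t.length) then
      if twGet t i == ' ' then
        let e := twRunEnd t (· == ' ') (t.length + 1) i
        ((t.drop i).take (e - i)) :: twSplitGo t fuel e
      else if twGet t i == '-' && decide (1 ≤ i) && twWordPunct (twGet t (i-1)) && twEmDashAhead t i then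
        let e := twRunEnd t (· == '-') (t.length + 1) i
        ((t.drop i).take (e - i)) :: twSplitGo t fuel e
      else
        let e := twAlt3 t (t.length + 1) (i + 1)
        ((t.drop i).take (e - i)) :: twSplitGo t fuel e
    else []

def twSplit (t : List Char) : List (List Char) := twSplitGo t (t.length + 1) 0

-- rfind('-', 0, k) on cs : last index of '-' in cs.take k, else -1
def twRfindHyphen (cs : List Char) (k : Nat) : Int :=
  let l := cs.take k
  match l.reverse.findIdx? (· == '-') with
  | some r => ((l.length - 1 - r : Nat) : Int)
  | none => -1

-- TextWrapper._handle_long_word (break_long_words=True, break_on_hyphens=True)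
def twHandleLong (stack : List (List Char)) (curline : List (List Char)) (curlen : Nat) (w : Int) :
    List (List Char) × List (List Char) :=
  match stack with
  | [] => ([], curline)       -- unreachable: caller guards on a non-empty stack
  | chunk :: rest =>
    let spaceLeft : Int := if w < 1 then 1 else w - curlen
    let endIdx : Nat :=
      if spaceLeft < (chunk.length : Int) then
        let hy := twRfindHyphen chunk spaceLeft.toNat
        if 0 < hy ∧ (chunk.take hy.toNat).any (· != '-') then hy.toNat + 1 else spaceLeft.toNat
      else spaceLeft.toNat
    (chunk.drop endIdx :: rest, curline ++ [chunk.take endIdx])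

-- the inner greedy packing loop of _wrap_chunks
def twPack (stack : List (List Char)) (curline : List (List Char)) (curlen : Nat) (w : Int) :
    List (List Char) × List (List Char) × Nat :=
  match stack with
  | [] => ([], curline, curlen)
  | c :: rest =>
    if ((curlen : Int) + c.length) ≤ w then twPack rest (curline ++ [c]) (curlen + c.length) w
    else (c :: rest, curline, curlen)

-- outer loop of _wrap_chunks (drop_whitespace=True, no indents, max_lines=None); the stack head is
-- Python's chunks[-1].  fuel ≥ total chunk characters + 1 makes the recursion structural; every
-- iteration of the Python loop removes at least one character, so the fuel never runs out.
def twWrapGo (fuel : Nat) (w : Int) (stack : List (List Char)) (lines : List (List Char)) :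
    List (List Char) :=
  match fuel with
  | 0 => lines
  | fuel + 1 =>
    match stack with
    | [] => lines
    | top :: rest =>
      let stack1 := if top.all (· == ' ') ∧ lines ≠ [] then rest else top :: rest
      let p := twPack stack1 [] 0 w
      let q : List (List Char) × List (List Char) :=
        match p.1 with
        | c :: cs => if w < (c.length : Int) then twHandleLong (c :: cs) p.2.1 p.2.2 w else (p.1, p.2.1)
        | [] => ([], p.2.1)
      let curline := if q.2 ≠ [] ∧ (q.2.getLast!).all (· == ' ') then q.2.dropLast else q.2
      let lines1 := if curline ≠ [] then lines ++ [curline.flatten] else lines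
      twWrapGo fuel w q.1 lines1

-- textwrap.wrap(s, w) with default options; Python raises ValueError when w ≤ 0 and a wrap is
-- attempted — those inputs are excluded by Pre_scroll, the [] returned here is never relied on.
def pyWrap (s : List Char) (w : Int) : List (List Char) :=
  if w ≤ 0 then []
  else
    let t := twMunge s
    twWrapGo (t.length + 1) w (twSplit t) []

-- str.ljust(w) (exact; no-op when w ≤ len)
def pyLjust (cs : List Char) (w : Int) : List Char :=
  cs ++ List.replicate (w - cs.length).toNat ' '

-- port of A; list indexing into reassemble / items is ported with pyGetD: under Pre_scroll every
-- index A uses is in range, so the default is never consulted.  int(.9 + ((len-4)/8)) and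
-- int((new_length - len)/2) are ported as the exact integer values of those float expressions
-- ((len+3)//8, and floor halving of the non-negative gap), exact for every reachable length.
def scroll (original : String) (width : Int) (margins : Int) (top : Int) (bottom : Int) (padding : Int) (replacements : List (List String)) : String :=
  let temp : List (List Char) := (PySem.List.pyRange 0 top 1).foldl (fun a _ => a ++ [[' ']]) []
  let temp := (PySem.Chars.splitOn original.toList "\\n".toList).foldl
      (fun a line => if line = [] then a ++ [[' ']] else a ++ [line]) temp
  let temp := (PySem.List.pyRange 0 bottom 1).foldl (fun a _ => a ++ [[' ']]) temp
  let message := temp.foldl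
      (fun a line => if line ≠ [' '] then a ++ pyWrap line (width - margins * 2) else a ++ [[' ']]) []
  let reps : Int := PySem.Int.floordiv ((message.length : Int) - 4 + 7) 8
  let new_length : Int := 5 + reps * 8
  let border_top : Int := PySem.Int.floordiv (new_length - (message.length : Int)) 2
  let border_bottom : Int := new_length - (message.length : Int) - border_top
  let reassemble : List (List Char) := (PySem.List.pyRange 0 border_top 1).foldl (fun a _ => a ++ [[' ']]) []
  let reassemble := message.foldl (fun a l => a ++ [l]) reassemble
  let reassemble := (PySem.List.pyRange 0 border_bottom 1).foldl (fun a _ => a ++ [[' ']]) reassemble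
  let iwidth := width - margins * 2
  let m := PySem.List.pyRepeat [' '] margins
  let shape : List (List Char) := [
    "  ".toList ++ PySem.List.pyRepeat ['_'] width ++ "__".toList,
    " /".toList ++ m ++ pyLjust (PySem.List.pyGetD reassemble 0 []) iwidth ++ m ++ "/ \\ ".toList,
    "|".toList ++ m ++ pyLjust (PySem.List.pyGetD reassemble 1 []) iwidth ++ m ++ "| \\/ ".toList,
    "|".toList ++ m ++ pyLjust (PySem.List.pyGetD reassemble 2 []) iwidth ++ m ++ "| ".toList,
    " \\".toList ++ m ++ pyLjust (PySem.List.pyGetD reassemble 3 []) iwidth ++ m ++ "\\ ".toList]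
  let loopOut := (PySem.List.pyRange 0 reps 1).foldl
      (fun (st : List (List Char) × Int) _ =>
        (st.1 ++ [
          "  \\".toList ++ m ++ pyLjust (PySem.List.pyGetD reassemble (4 + st.2 * 8) []) iwidth ++ m ++ "\\ ".toList,
          "   |".toList ++ m ++ pyLjust (PySem.List.pyGetD reassemble (5 + st.2 * 8) []) iwidth ++ m ++ "| ".toList,
          "   |".toList ++ m ++ pyLjust (PySem.List.pyGetD reassemble (6 + st.2 * 8) []) iwidth ++ m ++ "| ".toList,
          "  /".toList ++ m ++ pyLjust (PySem.List.pyGetD reassemble (7 + st.2 * 8) []) iwidth ++ m ++ "/ ".toList,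
          " /".toList ++ m ++ pyLjust (PySem.List.pyGetD reassemble (8 + st.2 * 8) []) iwidth ++ m ++ "/ ".toList,
          "|".toList ++ m ++ pyLjust (PySem.List.pyGetD reassemble (9 + st.2 * 8) []) iwidth ++ m ++ "| ".toList,
          "|".toList ++ m ++ pyLjust (PySem.List.pyGetD reassemble (10 + st.2 * 8) []) iwidth ++ m ++ "| ".toList,
          " \\".toList ++ m ++ pyLjust (PySem.List.pyGetD reassemble (11 + st.2 * 8) []) iwidth ++ m ++ "\\ ".toList],
         st.2 + 1)) (shape, 0)
  let shape := loopOut.1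
  let shape := shape ++ [" _\\".toList ++ PySem.List.pyRepeat ['_'] (margins + iwidth + margins) ++ " \\ ".toList]
  let shape := shape ++ ["/ ".toList ++ PySem.List.pyRepeat [' '] (margins + iwidth + margins) ++ "/\\ | ".toList]
  let shape := shape ++ ["\\".toList ++ PySem.List.pyRepeat ['_'] (margins + iwidth + margins + 1) ++ "\\_/ ".toList]
  let final := shape.foldl
      (fun fin line =>
        fin ++ PySem.List.pyRepeat [' '] padding
            ++ (replacements.foldl
                (fun data item =>
                  PySem.Chars.replace data (PySem.List.pyGetD item 0 "").toList (PySem.List.pyGetD item 1 "").toList)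
                line)
            ++ "|/".toList) []
  String.ofList final

-- ===== PORT B =====
-- Source B's 'finish': apply the replacements, then padding + '|/' (item[0]/item[1] via pyGetD, as in A)
def pvFinish (replacements : List (List String)) (padding : Int) (line : List Char) : List Char :=
  PySem.List.pyRepeat [' '] padding
    ++ (replacements.foldl
        (fun d item =>
          PySem.Chars.replace d (PySem.List.pyGetD item 0 "").toList (PySem.List.pyGetD item 1 "").toList)
        line)
    ++ "|/".toList

-- Source B's 'row': frame a content line and finish it at once
def pvRow (replacements : List (List String)) (padding : Int) (m : List Char) (iwidth : Int)
    (pre body suf : List Char) : List Char :=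
  pvFinish replacements padding (pre ++ m ++ pyLjust body iwidth ++ m ++ suf)

-- Source B's 'blocks': structural recursion eating eight content lines per step; the fallback [] is
-- Python's 'len(rest) <= 1' exit (lengths 2–7 never occur: the content length is ≡ 5 mod 8)
def pvBlocks (replacements : List (List String)) (padding : Int) (m : List Char) (iwidth : Int) :
    List (List Char) → List (List Char)
  | a :: b :: c :: d :: e :: f :: g :: h :: t =>
      [pvRow replacements padding m iwidth "  \\".toList a "\\ ".toList,
       pvRow replacements padding m iwidth "   |".toList b "| ".toList,
       pvRow replacements padding m iwidth "   |".toList c "| ".toList,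
       pvRow replacements padding m iwidth "  /".toList d "/ ".toList,
       pvRow replacements padding m iwidth " /".toList e "/ ".toList,
       pvRow replacements padding m iwidth "|".toList f "| ".toList,
       pvRow replacements padding m iwidth "|".toList g "| ".toList,
       pvRow replacements padding m iwidth " \\".toList h "\\ ".toList]
        ++ pvBlocks replacements padding m iwidth t
  | _ => []

-- port of B (Source B); content[4:] is ported with PySem.List.slice
def scroll_alt (original : String) (width : Int) (margins : Int) (top : Int) (bottom : Int) (padding : Int) (replacements : List (List String)) : String :=
  let iwidth := width - 2 * margins
  let m := PySem.List.pyRepeat [' '] margins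
  let message :=
    (PySem.List.pyRepeat [[' ']] top ++ PySem.Chars.splitOn original.toList "\\n".toList
        ++ PySem.List.pyRepeat [[' ']] bottom).foldl
      (fun acc line => if line = [] ∨ line = [' '] then acc ++ [[' ']] else acc ++ pyWrap line iwidth) []
  let n : Int := message.length
  let reps := PySem.Int.floordiv (n + 3) 8
  let gap := 5 + reps * 8 - n
  let content := PySem.List.pyRepeat [[' ']] (PySem.Int.floordiv gap 2) ++ message
      ++ PySem.List.pyRepeat [[' ']] (gap - PySem.Int.floordiv gap 2)
  let inner := 2 * margins + iwidth
  let parts : List (List Char) :=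
    [pvFinish replacements padding ("  ".toList ++ PySem.List.pyRepeat ['_'] width ++ "__".toList),
     pvRow replacements padding m iwidth " /".toList (PySem.List.pyGetD content 0 []) "/ \\ ".toList,
     pvRow replacements padding m iwidth "|".toList (PySem.List.pyGetD content 1 []) "| \\/ ".toList,
     pvRow replacements padding m iwidth "|".toList (PySem.List.pyGetD content 2 []) "| ".toList,
     pvRow replacements padding m iwidth " \\".toList (PySem.List.pyGetD content 3 []) "\\ ".toList]
      ++ pvBlocks replacements padding m iwidth (PySem.List.slice content (some 4) none)
      ++ [pvFinish replacements padding (" _\\".toList ++ PySem.List.pyRepeat ['_'] inner ++ " \\ ".toList),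
          pvFinish replacements padding ("/ ".toList ++ PySem.List.pyRepeat [' '] inner ++ "/\\ | ".toList),
          pvFinish replacements padding ("\\".toList ++ PySem.List.pyRepeat ['_'] (inner + 1) ++ "\\_/ ".toList)]
  String.ofList (PySem.Chars.join [] parts)

-- ===== PRECONDITION & SPEC =====
-- Pre_scroll excludes exactly the inputs where the Python A raises: a replacement item with fewer
-- than two entries (IndexError on item[0]/item[1]), and a wrapped width ≤ 0 while some line
-- actually reaches textwrap.wrap (ValueError from _wrap_chunks).
def Pre_scroll (original : String) (width : Int) (margins : Int) (top : Int) (bottom : Int) (padding : Int) (replacements : List (List String)) : Prop :=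
  (∀ item ∈ replacements, 2 ≤ item.length) ∧
  (1 ≤ width - margins * 2 ∨
    ∀ line ∈ PySem.Chars.splitOn original.toList "\\n".toList, line = [] ∨ line = [' '])
instance (original : String) (width : Int) (margins : Int) (top : Int) (bottom : Int) (padding : Int) (replacements : List (List String)) : Decidable (Pre_scroll original width margins top bottom padding replacements) := by unfold Pre_scroll; infer_instance

def pvWitness_scroll : String × Int × Int × Int × Int × Int × List (List String) :=
  ("hello world", 20, 2, 1, 1, 0, [["l", "L"]])

def Spec_scroll (original : String) (width : Int) (margins : Int) (top : Int) (bottom : Int) (padding : Int) (replacements : List (List String)) (out : String) : Prop := out = scroll_alt original width margins top bottom padding replacements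
instance (original : String) (width : Int) (margins : Int) (top : Int) (bottom : Int) (padding : Int) (replacements : List (List String)) (out : String) : Decidable (Spec_scroll original width margins top bottom padding replacements out) := by unfold Spec_scroll; infer_instance

-- ===== CLAIM (what is proved, stated in full; the proofs are below) =====
def Claim_equal_scroll : Prop := ∀ (original : String) (width : Int) (margins : Int) (top : Int) (bottom : Int) (padding : Int) (replacements : List (List String)), Dom_scroll original width margins top bottom padding replacements → Pre_scroll original width margins top bottom padding replacements → Spec_scroll original width margins top bottom padding replacements (scroll original width margins top bottom padding replacements)

-- ===== LEMMAS AND PROOFS =====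

-- the (pre, suf) frame fragments of one 8-line block, used only by the proofs to relate A's
-- counter loop to B's recursive pvBlocks
def scrollBlock : List (List Char × List Char) :=
  [("  \\".toList, "\\ ".toList), ("   |".toList, "| ".toList), ("   |".toList, "| ".toList),
   ("  /".toList, "/ ".toList), (" /".toList, "/ ".toList), ("|".toList, "| ".toList),
   ("|".toList, "| ".toList), (" \\".toList, "\\ ".toList)]

lemma pv_join_nil (l : List (List Char)) : PySem.Chars.join [] l = l.flatten := by
  simp only [PySem.Chars.join, List.intercalate]
  induction l with
  | nil => simp
  | cons a t ih => cases t <;> simp_all [List.intersperse]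

lemma pv_flatMap_const {α β : Type} (l : List α) (x : β) :
    l.flatMap (fun _ => [x]) = List.replicate l.length x := by
  induction l with
  | nil => rfl
  | cons a t ih => simp [ih, List.replicate_succ]

lemma pv_flatMap_ite {α β : Type} (l : List α) (p : α → Prop) [DecidablePred p] (f g : α → β) :
    l.flatMap (fun y => if p y then [f y] else [g y]) = l.map (fun y => if p y then f y else g y) := by
  induction l with
  | nil => rfl
  | cons a t ih => by_cases h : p a <;> simp [h, ih]

lemma pv_append_ite {α : Type} (c : Prop) [Decidable c] (a x y : List α) :
    (if c then a ++ x else a ++ y) = a ++ (if c then x else y) := by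
  split <;> rfl

lemma pv_repeat_natCast_succ {α : Type} (xs : List α) (k : Nat) :
    PySem.List.pyRepeat xs ((k : Int) + 1) = xs ++ PySem.List.pyRepeat xs (k : Int) := by
  simp [PySem.List.pyRepeat, List.replicate_succ]

lemma pv_drop_cons {α : Type} (C : List α) (n : Nat) (d : α) (h : n < C.length) :
    C.drop n = C.getD n d :: C.drop (n + 1) := by
  rw [List.drop_eq_getElem_cons h, List.getD_eq_getElem _ _ h]

-- A's message loop (over the '' → ' ' mapped lines) computes B's fused message loop
lemma pv_message_eq (tN bN : Nat) (L : List (List Char)) (iw : Int) :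
    (List.replicate tN [' '] ++ L.map (fun y => if y = [] then [' '] else y)
        ++ List.replicate bN [' ']).flatMap
      (fun x => if x = [' '] then [[' ']] else pyWrap x iw)
    = (List.replicate tN [' '] ++ L ++ List.replicate bN [' ']).flatMap
      (fun line => if line = [] ∨ line = [' '] then [[' ']] else pyWrap line iw) := by
  have hmap : List.replicate tN [' '] ++ L.map (fun y => if y = [] then [' '] else y)
      ++ List.replicate bN [' ']
      = (List.replicate tN [' '] ++ L ++ List.replicate bN [' ']).map
          (fun y => if y = [] then [' '] else y) := by
    simp [List.map_append, List.map_replicate]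
  rw [hmap, List.flatMap_map]
  apply List.flatMap_congr  -- pointwise: the two branch tests agree after the '' → ' ' mapping
  intro l _
  by_cases h1 : l = [] <;> by_cases h2 : l = [' '] <;> simp [h1, h2]

lemma pv_final (P E : List Char) (f : List Char → List Char) (body : List (List Char)) :
    body.foldl (fun fin line => fin ++ P ++ f line ++ E) []
      = PySem.Chars.join [] (body.map (fun row => P ++ f row ++ E)) := by
  rw [pv_join_nil]
  suffices h : ∀ acc : List Char, body.foldl (fun fin line => fin ++ P ++ f line ++ E) acc
      = acc ++ (body.map (fun row => P ++ f row ++ E)).flatten by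
    rw [h []]; exact List.nil_append _
  induction body with
  | nil => simp
  | cons a t ih => intro acc; simp [List.foldl_cons, List.map_cons, List.flatten_cons, List.append_assoc]

lemma pv_loop (m : List Char) (iw : Int) (C : List (List Char)) :
    ∀ (L : List Int) (c : Nat) (acc : List (List Char)),
    4 + 8 * c + 8 * L.length ≤ C.length →
    L.foldl
      (fun (st : List (List Char) × Int) _ =>
        (st.1 ++ [
          "  \\".toList ++ m ++ pyLjust (PySem.List.pyGetD C (4 + st.2 * 8) []) iw ++ m ++ "\\ ".toList,
          "   |".toList ++ m ++ pyLjust (PySem.List.pyGetD C (5 + st.2 * 8) []) iw ++ m ++ "| ".toList,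
          "   |".toList ++ m ++ pyLjust (PySem.List.pyGetD C (6 + st.2 * 8) []) iw ++ m ++ "| ".toList,
          "  /".toList ++ m ++ pyLjust (PySem.List.pyGetD C (7 + st.2 * 8) []) iw ++ m ++ "/ ".toList,
          " /".toList ++ m ++ pyLjust (PySem.List.pyGetD C (8 + st.2 * 8) []) iw ++ m ++ "/ ".toList,
          "|".toList ++ m ++ pyLjust (PySem.List.pyGetD C (9 + st.2 * 8) []) iw ++ m ++ "| ".toList,
          "|".toList ++ m ++ pyLjust (PySem.List.pyGetD C (10 + st.2 * 8) []) iw ++ m ++ "| ".toList,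
          " \\".toList ++ m ++ pyLjust (PySem.List.pyGetD C (11 + st.2 * 8) []) iw ++ m ++ "\\ ".toList],
         st.2 + 1)) (acc, (c : Int))
    = (acc ++ ((PySem.List.pyRepeat scrollBlock (L.length : Int)).zip (C.drop (4 + 8 * c))).map
          (fun pc => pc.1.1 ++ m ++ pyLjust pc.2 iw ++ m ++ pc.1.2),
       ((c + L.length : Nat) : Int)) := by
  intro L
  induction L with
  | nil =>
    intro c acc h
    simp [PySem.List.pyRepeat]
  | cons x t ih =>
    intro c acc h
    simp only [List.foldl_cons]
    rw [show ((4 : Int) + (c : Int) * 8) = ((4 + 8 * c : Nat) : Int) by push_cast; ring,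
        show ((5 : Int) + (c : Int) * 8) = ((4 + 8 * c + 1 : Nat) : Int) by push_cast; ring,
        show ((6 : Int) + (c : Int) * 8) = ((4 + 8 * c + 2 : Nat) : Int) by push_cast; ring,
        show ((7 : Int) + (c : Int) * 8) = ((4 + 8 * c + 3 : Nat) : Int) by push_cast; ring,
        show ((8 : Int) + (c : Int) * 8) = ((4 + 8 * c + 4 : Nat) : Int) by push_cast; ring,
        show ((9 : Int) + (c : Int) * 8) = ((4 + 8 * c + 5 : Nat) : Int) by push_cast; ring,
        show ((10 : Int) + (c : Int) * 8) = ((4 + 8 * c + 6 : Nat) : Int) by push_cast; ring,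
        show ((11 : Int) + (c : Int) * 8) = ((4 + 8 * c + 7 : Nat) : Int) by push_cast; ring,
        show ((c : Int) + 1) = ((c + 1 : Nat) : Int) by push_cast; ring]
    simp only [PySem.List.pyGetD_natCast]
    rw [ih (c + 1) _ (by simp at h ⊢; omega)]
    simp only [List.length_cons]
    rw [show ((t.length + 1 : Nat) : Int) = ((t.length : Nat) : Int) + 1 by push_cast; ring,
        pv_repeat_natCast_succ]
    rw [pv_drop_cons C (4 + 8 * c) [] (by simp at h; omega),
        pv_drop_cons C (4 + 8 * c + 1) [] (by simp at h; omega),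
        pv_drop_cons C (4 + 8 * c + 1 + 1) [] (by simp at h; omega),
        pv_drop_cons C (4 + 8 * c + 1 + 1 + 1) [] (by simp at h; omega),
        pv_drop_cons C (4 + 8 * c + 1 + 1 + 1 + 1) [] (by simp at h; omega),
        pv_drop_cons C (4 + 8 * c + 1 + 1 + 1 + 1 + 1) [] (by simp at h; omega),
        pv_drop_cons C (4 + 8 * c + 1 + 1 + 1 + 1 + 1 + 1) [] (by simp at h; omega),
        pv_drop_cons C (4 + 8 * c + 1 + 1 + 1 + 1 + 1 + 1 + 1) [] (by simp at h; omega)]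
    simp only [scrollBlock, List.cons_append, List.nil_append, List.zip_cons_cons, List.map_cons]
    rw [show 4 + 8 * (c + 1) = 4 + 8 * c + 1 + 1 + 1 + 1 + 1 + 1 + 1 + 1 from by ring]
    ring_nf
    simp [List.append_assoc, List.cons_append]

-- B's recursive pvBlocks is the finished version of the zip-map A's loop amounts to
lemma pv_blocks_eq (R : List (List String)) (p : Int) (m : List Char) (iw : Int) :
    ∀ (r : Nat) (rest : List (List Char)), rest.length = 1 + 8 * r →
    pvBlocks R p m iw rest
      = ((PySem.List.pyRepeat scrollBlock (r : Int)).zip rest).map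
          (fun pc => pvRow R p m iw pc.1.1 pc.2 pc.1.2) := by
  intro r
  induction r with
  | zero =>
    intro rest h
    match rest, h with
    | [x], _ => simp [pvBlocks, PySem.List.pyRepeat]
  | succ k ih =>
    intro rest h
    match rest, h with
    | a :: b :: c :: d :: e :: f :: g :: hh :: t, h =>
      have ht : t.length = 1 + 8 * k := by simp at h; omega
      rw [show ((k + 1 : Nat) : Int) = ((k : Nat) : Int) + 1 by push_cast; ring,
          pv_repeat_natCast_succ]
      simp only [pvBlocks, scrollBlock, List.cons_append, List.nil_append, List.zip_cons_cons,
        List.map_cons, ih t ht]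

set_option maxHeartbeats 1000000 in
lemma pv_scroll_eq (original : String) (width margins top bottom padding : Int)
    (replacements : List (List String)) :
    scroll original width margins top bottom padding replacements
      = scroll_alt original width margins top bottom padding replacements := by
  unfold scroll scroll_alt
  simp only [pv_append_ite, ne_eq, ite_not, PySem.List.foldl_append_eq_flatMap,
    pv_flatMap_const, pv_flatMap_ite,
    PySem.List.length_pyRange_one, Int.sub_zero, PySem.List.pyRepeat_singleton, List.nil_append]
  rw [show ∀ a b : Int, a - b * 2 = a - 2 * b from fun a b => by ring]
  rw [show ∀ z : Int, z - 4 + 7 = z + 3 from fun z => by ring]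
  rw [show margins + (width - 2 * margins) + margins = 2 * margins + (width - 2 * margins) from by ring]
  simp only [List.flatMap_singleton']
  rw [pv_message_eq]
  generalize hM : List.flatMap (fun line => if line = [] ∨ line = [' '] then [[' ']] else pyWrap line (width - 2 * margins)) (List.replicate top.toNat [' '] ++ PySem.Chars.splitOn original.toList "\\n".toList ++ List.replicate bottom.toNat [' ']) = M
  have h0 : (0 : Int) ≤ PySem.Int.floordiv ((M.length : Int) + 3) 8 := by
    have hq := PySem.Int.floordiv_mul_add_mod ((M.length : Int) + 3) 8
    have hq2 := PySem.Int.mod_lt ((M.length : Int) + 3) (show (0:Int) < 8 by norm_num)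
    have hn : (0 : Int) ≤ (M.length : Int) := Int.natCast_nonneg _
    nlinarith
  obtain ⟨r, hr⟩ : ∃ r : Nat, PySem.Int.floordiv ((M.length : Int) + 3) 8 = (r : Int) :=
    ⟨(PySem.Int.floordiv ((M.length : Int) + 3) 8).toNat, (Int.toNat_of_nonneg h0).symm⟩
  rw [hr]
  have hq := PySem.Int.floordiv_mul_add_mod ((M.length : Int) + 3) 8
  have hq1 := PySem.Int.mod_nonneg ((M.length : Int) + 3) (show (0:Int) < 8 by norm_num)
  have hq2 := PySem.Int.mod_lt ((M.length : Int) + 3) (show (0:Int) < 8 by norm_num)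
  rw [hr] at hq
  have hp := PySem.Int.floordiv_mul_add_mod (5 + (r : Int) * 8 - (M.length : Int)) 2
  have hp1 := PySem.Int.mod_nonneg (5 + (r : Int) * 8 - (M.length : Int)) (show (0:Int) < 2 by norm_num)
  have hp2 := PySem.Int.mod_lt (5 + (r : Int) * 8 - (M.length : Int)) (show (0:Int) < 2 by norm_num)
  have hlen : (List.replicate (PySem.Int.floordiv (5 + (r : Int) * 8 - (M.length : Int)) 2).toNat [' '] ++ M ++ List.replicate (5 + (r : Int) * 8 - (M.length : Int) - PySem.Int.floordiv (5 + (r : Int) * 8 - (M.length : Int)) 2).toNat [' ']).length = 5 + 8 * r := by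
    simp only [List.length_append, List.length_replicate]
    omega
  generalize hC : List.replicate (PySem.Int.floordiv (5 + (r : Int) * 8 - (M.length : Int)) 2).toNat [' '] ++ M ++ List.replicate (5 + (r : Int) * 8 - (M.length : Int) - PySem.Int.floordiv (5 + (r : Int) * 8 - (M.length : Int)) 2).toNat [' '] = C at hlen ⊢
  -- A's loop → the zip-map normal form; B's slice → drop; B's pvBlocks → the same zip-map
  have hslice : PySem.List.slice C (some 4) none = C.drop 4 := by
    rw [show (4:Int) = ((4:Nat):Int) by norm_num, PySem.List.slice_from_natCast]
  rw [hslice]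
  rw [pv_blocks_eq replacements padding (List.replicate margins.toNat ' ') (width - 2 * margins) r
      (C.drop 4) (by simp [hlen]; omega)]
  have hloop := pv_loop (List.replicate margins.toNat ' ') (width - 2 * margins) C
      (PySem.List.pyRange 0 (r : Int) 1) 0
      ["  ".toList ++ List.replicate width.toNat '_' ++ "__".toList,
       " /".toList ++ List.replicate margins.toNat ' ' ++ pyLjust (PySem.List.pyGetD C 0 []) (width - 2 * margins) ++ List.replicate margins.toNat ' ' ++ "/ \\ ".toList,
       "|".toList ++ List.replicate margins.toNat ' ' ++ pyLjust (PySem.List.pyGetD C 1 []) (width - 2 * margins) ++ List.replicate margins.toNat ' ' ++ "| \\/ ".toList,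
       "|".toList ++ List.replicate margins.toNat ' ' ++ pyLjust (PySem.List.pyGetD C 2 []) (width - 2 * margins) ++ List.replicate margins.toNat ' ' ++ "| ".toList,
       " \\".toList ++ List.replicate margins.toNat ' ' ++ pyLjust (PySem.List.pyGetD C 3 []) (width - 2 * margins) ++ List.replicate margins.toNat ' ' ++ "\\ ".toList]
      (by simp [PySem.List.length_pyRange_one]; omega)
  simp only [Nat.cast_zero, Nat.mul_zero, Nat.add_zero, Nat.zero_add,
    PySem.List.length_pyRange_one, Int.sub_zero, Int.toNat_natCast] at hloop
  rw [hloop]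
  rw [pv_final]
  simp only [pvRow, pvFinish, PySem.List.pyRepeat_singleton, List.map_append, List.map_cons,
    List.map_nil, List.map_map, List.nil_append, List.cons_append, List.append_assoc]
  rfl

theorem scroll_witness_ok :
    Dom_scroll pvWitness_scroll.1 pvWitness_scroll.2.1 pvWitness_scroll.2.2.1 pvWitness_scroll.2.2.2.1
      pvWitness_scroll.2.2.2.2.1 pvWitness_scroll.2.2.2.2.2.1 pvWitness_scroll.2.2.2.2.2.2 ∧
    Pre_scroll pvWitness_scroll.1 pvWitness_scroll.2.1 pvWitness_scroll.2.2.1 pvWitness_scroll.2.2.2.1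
      pvWitness_scroll.2.2.2.2.1 pvWitness_scroll.2.2.2.2.2.1 pvWitness_scroll.2.2.2.2.2.2 := by
  constructor <;> decide

-- ===== VERDICT (by name: the statement is the Claim_ definition above) =====
theorem scroll_spec : Claim_equal_scroll := by
  intro original width margins top bottom padding replacements _hdom _hpre
  exact pv_scroll_eq original width margins top bottom padding replacements
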